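-- pv_equiv track=rewrite | github.com/fallon3d/FF_DA_2025 | draft_assistant/core/run_detection.py | recent_run_lengths
-- ===== SOURCE A (Python) =====
-- from typing import List, Dict, Tuple, Iterable, Optional
--
-- def recent_run_lengths(pos_history: List[str]) -> Dict[str, int]:
--     """
--     For each position, measure the contiguous run length from the end of the history.
--     e.g., history [..., RB, RB, WR] -> {'WR': 1}, but also tracks the last-pos run only.
--     """
--     out: Dict[str, int] = {}
--     if not pos_history:
--         return out
--     last = pos_history[-1]
--     length = 0
--     for p in reversed(pos_history):
--         if p == last:
--             length += 1
--         else: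
--             break
--     out[last] = length
--     return out
-- ===== SOURCE B (Python) =====
-- def recent_run_lengths(pos_history):
--     if not pos_history:
--         return {}
--     current = pos_history[0]
--     count = 1
--     for p in pos_history[1:]:
--         if p == current:
--             count += 1
--         else:
--             current = p
--             count = 1
--     return {current: count}
-- ===== Notes on version B (the rewrite author's own statement) =====
-- stated objective: alternative
-- what changed: Replaces the reverse early-break scan (indexing pos_history[-1], then iterating reversed(pos_history) until a mismatch) with a single forward pass keeping a resetting (current, count) accumulator; the final accumulator is the last element's trailing run.
import Mathlib
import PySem

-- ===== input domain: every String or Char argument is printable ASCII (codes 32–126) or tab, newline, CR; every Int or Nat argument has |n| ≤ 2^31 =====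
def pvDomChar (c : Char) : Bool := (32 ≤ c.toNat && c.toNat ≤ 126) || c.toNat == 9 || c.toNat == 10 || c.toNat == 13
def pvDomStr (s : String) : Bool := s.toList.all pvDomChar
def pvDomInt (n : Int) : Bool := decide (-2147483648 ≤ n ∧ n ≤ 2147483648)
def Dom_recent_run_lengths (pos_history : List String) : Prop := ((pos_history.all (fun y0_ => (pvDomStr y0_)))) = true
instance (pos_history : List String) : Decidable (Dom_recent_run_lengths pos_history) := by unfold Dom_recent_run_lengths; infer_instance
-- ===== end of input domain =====

-- B replaces A's reverse early-break scan with a single forward pass keeping a resetting (current, count) accumulator (alternative decomposition, same cost).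


-- ===== PORT A =====
-- the 'for p in reversed(pos_history): if p == last: length += 1 else: break' loop:
-- counts leading elements equal to `last`, stopping at the first mismatch
def runFromA (last : String) : List String → Int
  | [] => 0
  | p :: rest => if p = last then runFromA last rest + 1 else 0

def recent_run_lengths (pos_history : List String) : List (String × Int) :=
  if pos_history.isEmpty then []
  else
    match PySem.List.pyGet? pos_history (-1) with
    | none => []
    | some last => [(last, runFromA last pos_history.reverse)]

-- ===== PORT B =====
def stepB (st : String × Int) (p : String) : String × Int :=
  if p = st.1 then (st.1, st.2 + 1) else (p, 1)

def recent_run_lengths_alt (pos_history : List String) : List (String × Int) :=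
  match pos_history with
  | [] => []
  | h :: t =>
    let st := t.foldl stepB (h, 1)
    [(st.1, st.2)]

-- ===== PRECONDITION & SPEC =====
def Spec_recent_run_lengths (pos_history : List String) (out : List (String × Int)) : Prop := out = recent_run_lengths_alt pos_history
instance (pos_history : List String) (out : List (String × Int)) : Decidable (Spec_recent_run_lengths pos_history out) := by unfold Spec_recent_run_lengths; infer_instance

-- ===== CLAIM (what is proved, stated in full; the proofs are below) =====
def Claim_equal_recent_run_lengths : Prop := ∀ (pos_history : List String), Dom_recent_run_lengths pos_history → Spec_recent_run_lengths pos_history (recent_run_lengths pos_history)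

-- ===== LEMMAS AND PROOFS =====

theorem runFromA_head_ne (x L : String) (rest : List String) (h : x ≠ L) :
    runFromA x (L :: rest) = 0 := by
  unfold runFromA; rw [if_neg (fun e => h e.symm)]

-- the reversed nonempty list starts with its last element
theorem rev_app_single (t : List String) (h : String) :
    t.reverse ++ [h] = t.getLastD h :: ((h :: t).dropLast).reverse := by
  induction t using List.reverseRecOn with
  | nil => simp
  | append_singleton t' x _ =>
    rw [List.getLastD_concat, List.reverse_append, List.reverse_singleton,
      show h :: (t' ++ [x]) = (h :: t') ++ [x] from rfl, List.dropLast_concat,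
      List.reverse_cons]
    simp

-- main invariant: B's forward fold ends at (last element, trailing run length as counted by A)
theorem foldl_stepB (t : List String) (h : String) :
    t.foldl stepB (h, 1) = (t.getLastD h, runFromA (t.getLastD h) (t.reverse ++ [h])) := by
  induction t using List.reverseRecOn with
  | nil => simp [runFromA]
  | append_singleton t' x ih =>
    rw [List.foldl_append, ih]
    by_cases hx : x = t'.getLastD h
    · simp [stepB, hx, runFromA]
    · have h0 : runFromA x (t'.reverse ++ [h]) = 0 := by
        rw [rev_app_single]; exact runFromA_head_ne _ _ _ hx
      simp only [List.foldl_cons, List.foldl_nil, stepB, if_neg hx, List.getLastD_concat,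
        List.reverse_append, List.reverse_singleton, List.cons_append,
        List.nil_append, runFromA, h0]
      simp

-- ===== VERDICT (by name: the statement is the Claim_ definition above) =====
theorem recent_run_lengths_spec : Claim_equal_recent_run_lengths := by
  intro pos_history _
  unfold Spec_recent_run_lengths recent_run_lengths recent_run_lengths_alt
  cases pos_history with
  | nil => rfl
  | cons h t =>
    rw [if_neg (by simp), PySem.List.pyGet?_neg_one]
    have hl : (h :: t).getLast? = some (t.getLastD h) := by
      rw [List.getLastD_eq_getLast?]; exact List.getLast?_cons
    rw [hl]
    show [(t.getLastD h, runFromA (t.getLastD h) ((h :: t).reverse))]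
        = [((t.foldl stepB (h, 1)).1, (t.foldl stepB (h, 1)).2)]
    rw [List.reverse_cons, foldl_stepB]
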